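-- pv_equiv track=rewrite | github.com/bhofmei/analysis-scripts | methyl/determine_cg_smps.py | computeDifferencesChrm
-- ===== SOURCE A (Python) =====
-- def computeDifferencesChrm( chrmDict, numLines ):
-- 	# difference matrix (note: only top diagonal will be filled)
-- 	diffMatrix = [ [0]*numLines for x in range(numLines) ]
--
-- 	# iterate through positions
-- 	for pos in sorted( chrmDict.keys() ):
-- 		methAr = chrmDict[pos][0]
-- 		# iterate through lines pairwise
-- 		for i in range( numLines ):
-- 			for j in range( i+1, numLines ):
-- 				diffMatrix[j][i] += ( methAr[i] != methAr[j] )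
-- 	return diffMatrix
-- ===== SOURCE B (Python) =====
-- def computeDifferencesChrm(chrmDict, numLines):
--     # transpose: one column per line index, then count mismatches per pair
--     rows = [chrmDict[pos][0] for pos in chrmDict]
--     cols = [[row[i] for row in rows] for i in range(numLines)]
--     return [[sum(1 for a, b in zip(cols[i], cols[j]) if a != b) if i < j else 0
--              for i in range(numLines)] for j in range(numLines)]
-- ===== Notes on version B (the rewrite author's own statement) =====
-- stated objective: alternative
-- what changed: A accumulates into a zero matrix with a triple nested loop (positions x line pairs); B first materializes a transposed per-line column list and then builds the matrix directly, counting mismatches of each column pair with zip.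
-- outside the precondition, e.g. on computeDifferencesChrm({0: [[]]}, 1): A returns [[0]], B raises IndexError
import Mathlib
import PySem

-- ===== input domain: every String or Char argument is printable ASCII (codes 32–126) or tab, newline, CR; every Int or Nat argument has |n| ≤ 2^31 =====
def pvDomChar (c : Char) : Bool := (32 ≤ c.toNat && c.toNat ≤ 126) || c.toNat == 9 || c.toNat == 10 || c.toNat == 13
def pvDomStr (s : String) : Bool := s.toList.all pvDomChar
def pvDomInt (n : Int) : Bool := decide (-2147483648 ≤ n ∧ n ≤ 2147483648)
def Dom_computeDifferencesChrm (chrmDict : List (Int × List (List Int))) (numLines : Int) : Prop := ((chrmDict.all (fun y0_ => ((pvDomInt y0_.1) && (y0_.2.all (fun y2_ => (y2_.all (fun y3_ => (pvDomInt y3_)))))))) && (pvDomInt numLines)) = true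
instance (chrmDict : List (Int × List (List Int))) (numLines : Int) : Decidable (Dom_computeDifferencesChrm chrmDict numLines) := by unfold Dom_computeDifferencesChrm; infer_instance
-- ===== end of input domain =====

-- B replaces A's in-place triple-loop accumulation by a transpose-then-count construction
-- (alternative decomposition, same asymptotic cost; return value only — neither program mutates its arguments).

-- ===== PORT A =====
-- Literal port of A.  for-loops over range(numLines) / range(i+1, numLines) are ported as folds
-- over List.range numLines.toNat / List.range' (i+1) … (exact: Python's range is empty for
-- numLines ≤ 0 and indices are nonnegative); under Pre_ every list index Python takes is in
-- range, so methAr[i] / chrmDict[pos][0] are ported with getD / headI defaults.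
def computeDifferencesChrm (chrmDict : List (Int × List (List Int))) (numLines : Int) : List (List Int) :=
  let n := numLines.toNat
  let diffMatrix : List (List Int) := List.replicate n (List.replicate n 0)
  (PySem.List.sorted (chrmDict.map Prod.fst) (fun k => k) false).foldl
    (fun dm pos =>
      let methAr := (((PySem.Dict.mk chrmDict).get? pos).getD []).headI
      (List.range n).foldl
        (fun dm i =>
          (List.range' (i+1) (n - (i+1))).foldl
            (fun dm j =>
              dm.modify j (fun row => row.modify i
                (fun v => v + (if methAr.getD i 0 ≠ methAr.getD j 0 then 1 else 0))))
            dm)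
        dm)
    diffMatrix

-- ===== PORT B =====
-- sum(1 for a, b in zip(cols[i], cols[j]) if a != b)
def pvCountDiff (a b : List Int) : Int :=
  (((a.zip b).countP (fun p => p.1 ≠ p.2) : Nat) : Int)

def computeDifferencesChrm_alt (chrmDict : List (Int × List (List Int))) (numLines : Int) : List (List Int) :=
  let n := numLines.toNat
  let rows := chrmDict.map (fun p => p.2.headI)
  let cols := (List.range n).map (fun i => rows.map (fun r => r.getD i 0))
  (List.range n).map (fun j =>
    (List.range n).map (fun i =>
      if i < j then pvCountDiff (cols.getD i []) (cols.getD j []) else 0))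

-- ===== PRECONDITION & SPEC =====
-- Pre_ requires the pairwise-distinct keys a Python dict guarantees, a nonempty value list at
-- every key (else A raises IndexError on chrmDict[pos][0]), and a first row of length ≥ numLines
-- at every key: on a shorter row A raises IndexError for numLines ≥ 2, and for numLines = 1 on an
-- empty row A returns [[0]] without indexing the row while B's column build indexes it and raises.
def Pre_computeDifferencesChrm (chrmDict : List (Int × List (List Int))) (numLines : Int) : Prop :=
  (chrmDict.map Prod.fst).Nodup ∧
  ∀ p ∈ chrmDict, p.2 ≠ [] ∧ numLines ≤ (p.2.headI.length : Int)

instance (chrmDict : List (Int × List (List Int))) (numLines : Int) : Decidable (Pre_computeDifferencesChrm chrmDict numLines) := by unfold Pre_computeDifferencesChrm; infer_instance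

def pvWitness_computeDifferencesChrm : (List (Int × List (List Int))) × Int :=
  ([(2, [[0, 1, 1]]), (1, [[1, 1, 0]])], 3)

def Spec_computeDifferencesChrm (chrmDict : List (Int × List (List Int))) (numLines : Int) (out : List (List Int)) : Prop := out = computeDifferencesChrm_alt chrmDict numLines
instance (chrmDict : List (Int × List (List Int))) (numLines : Int) (out : List (List Int)) : Decidable (Spec_computeDifferencesChrm chrmDict numLines out) := by unfold Spec_computeDifferencesChrm; infer_instance

-- ===== CLAIM (what is proved, stated in full; the proofs are below) =====
def Claim_equal_computeDifferencesChrm : Prop := ∀ (chrmDict : List (Int × List (List Int))) (numLines : Int), Dom_computeDifferencesChrm chrmDict numLines → Pre_computeDifferencesChrm chrmDict numLines → Spec_computeDifferencesChrm chrmDict numLines (computeDifferencesChrm chrmDict numLines)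

-- ===== LEMMAS AND PROOFS =====

-- entry (j,i) of a matrix, 0 outside
def pvEnt (dm : List (List Int)) (j i : Nat) : Int := (dm.getD j []).getD i 0
-- n×n shape
def pvShape (n : Nat) (dm : List (List Int)) : Prop := dm.length = n ∧ ∀ r ∈ dm, r.length = n

theorem pvShape_madd (n j i : Nat) (d : Int) (dm : List (List Int)) (h : pvShape n dm) :
    pvShape n (dm.modify j (fun row => row.modify i (fun v => v + d))) := by
  obtain ⟨hl, hr⟩ := h
  refine ⟨by simpa using hl, ?_⟩
  intro r hrm
  rw [List.mem_iff_getElem?] at hrm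
  obtain ⟨k, hk⟩ := hrm
  rw [List.getElem?_modify] at hk
  rcases hd : dm[k]? with _ | row
  · simp [hd] at hk
  · rw [hd] at hk
    simp only [Option.map_eq_map, Option.map_some] at hk
    have hrow : row ∈ dm := List.mem_of_getElem? hd
    have := hr row hrow
    by_cases hjk : j = k <;> simp [hjk] at hk <;> simp [← hk, this]

theorem pvEnt_madd (n j i : Nat) (d : Int) (dm : List (List Int)) (h : pvShape n dm) (j' i' : Nat) :
    pvEnt (dm.modify j (fun row => row.modify i (fun v => v + d))) j' i' =
      pvEnt dm j' i' + if j' = j ∧ i' = i ∧ j < n ∧ i < n then d else 0 := by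
  obtain ⟨hl, hr⟩ := h
  unfold pvEnt
  simp only [List.getD_eq_getElem?_getD]
  rw [List.getElem?_modify]
  rcases hd : dm[j']? with _ | row
  · have hb : ¬ j' < n := by
      have := List.getElem?_eq_none_iff.mp hd; omega
    rw [if_neg (by rintro ⟨rfl, _, hn, _⟩; exact hb hn)]
    simp
  · have hrow : row ∈ dm := List.mem_of_getElem? hd
    have hlen : row.length = n := hr row hrow
    have hjn : j' < n := by have := (List.getElem?_eq_some_iff.mp hd).1; omega
    simp only [Option.map_eq_map, Option.map_some, Option.getD_some]
    by_cases hj : j = j'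
    · subst hj
      rw [if_pos rfl, List.getElem?_modify]
      rcases he : row[i']? with _ | v
      · have hbi : ¬ i' < n := by have := List.getElem?_eq_none_iff.mp he; omega
        rw [if_neg (by rintro ⟨_, rfl, _, hn⟩; exact hbi hn)]
        simp
      · have hin : i' < n := by have := (List.getElem?_eq_some_iff.mp he).1; omega
        simp only [Option.map_eq_map, Option.map_some, Option.getD_some]
        by_cases hi : i = i'
        · subst hi
          simp [hjn, hin]
        · rw [if_neg hi, if_neg (by rintro ⟨_, rfl, _, _⟩; exact hi rfl)]
          simp
    · rw [if_neg hj, if_neg (by rintro ⟨rfl, _, _, _⟩; exact hj rfl)]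
      simp

theorem pvInner (n i0 : Nat) (val : Nat → Int) (J : List Nat) (hJ : J.Nodup) :
    ∀ (dm : List (List Int)), pvShape n dm →
    pvShape n (J.foldl (fun dm j => dm.modify j (fun row => row.modify i0 (fun v => v + val j))) dm) ∧
    ∀ j' i', pvEnt (J.foldl (fun dm j => dm.modify j (fun row => row.modify i0 (fun v => v + val j))) dm) j' i' =
      pvEnt dm j' i' + if j' ∈ J ∧ i' = i0 ∧ j' < n ∧ i0 < n then val j' else 0 := by
  induction J with
  | nil => intro dm h; refine ⟨h, ?_⟩; intro j' i'; simp
  | cons j0 J' ih =>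
    intro dm h
    have hnd : j0 ∉ J' := (List.nodup_cons.mp hJ).1
    have hJ' : J'.Nodup := (List.nodup_cons.mp hJ).2
    have h1 := pvShape_madd n j0 i0 (val j0) dm h
    obtain ⟨S, E⟩ := ih hJ' _ h1
    refine ⟨by simpa using S, ?_⟩
    intro j' i'
    simp only [List.foldl_cons]
    rw [E j' i', pvEnt_madd n j0 i0 (val j0) dm h j' i']
    by_cases hj : j' = j0
    · subst hj
      simp [hnd]
    · simp [hj, List.mem_cons]

theorem pvOuter (n : Nat) (dval : Nat → Nat → Int) (I : List Nat) (hI : I.Nodup) (hIb : ∀ i ∈ I, i < n) :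
    ∀ (dm : List (List Int)), pvShape n dm →
    pvShape n (I.foldl (fun dm i => (List.range' (i+1) (n - (i+1))).foldl (fun dm j => dm.modify j (fun row => row.modify i (fun v => v + dval i j))) dm) dm) ∧
    ∀ j' i', pvEnt (I.foldl (fun dm i => (List.range' (i+1) (n - (i+1))).foldl (fun dm j => dm.modify j (fun row => row.modify i (fun v => v + dval i j))) dm) dm) j' i' =
      pvEnt dm j' i' + if i' ∈ I ∧ i' < j' ∧ j' < n then dval i' j' else 0 := by
  induction I with
  | nil => intro dm h; refine ⟨h, ?_⟩; intro j' i'; simp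
  | cons i0 I' ih =>
    intro dm h
    have hnd : i0 ∉ I' := (List.nodup_cons.mp hI).1
    have hI' : I'.Nodup := (List.nodup_cons.mp hI).2
    have hi0 : i0 < n := hIb i0 (by simp)
    have hIb' : ∀ i ∈ I', i < n := fun i hi => hIb i (by simp [hi])
    obtain ⟨S1, E1⟩ := pvInner n i0 (dval i0) (List.range' (i0+1) (n - (i0+1))) (List.nodup_range') dm h
    obtain ⟨S, E⟩ := ih hI' hIb' _ S1
    refine ⟨by simpa using S, ?_⟩
    intro j' i'
    simp only [List.foldl_cons]
    rw [E j' i', E1 j' i']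
    have hmem : j' ∈ List.range' (i0+1) (n - (i0+1)) ↔ i0 < j' ∧ j' < n := by
      rw [List.mem_range'_1]; omega
    by_cases hi : i' = i0
    · subst hi
      by_cases hlt : i' < j' ∧ j' < n
      · simp [hmem, hlt, hnd, hi0]
      · simp only [List.mem_cons]
        rw [if_neg (by rintro ⟨hm, _, _, _⟩; exact hlt ⟨(hmem.mp hm).1, (hmem.mp hm).2⟩),
          if_neg (by rintro ⟨hm, _, _⟩; exact hnd hm),
          if_neg (by rintro ⟨_, hl2, hb2⟩; exact hlt ⟨hl2, hb2⟩)]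
        simp
    · rw [if_neg (by rintro ⟨_, he, _, _⟩; exact hi he)]
      simp only [List.mem_cons]
      rw [add_zero]
      by_cases hm' : i' ∈ I' ∧ i' < j' ∧ j' < n
      · rw [if_pos hm', if_pos ⟨Or.inr hm'.1, hm'.2⟩]
      · rw [if_neg hm', if_neg (by rintro ⟨hor, hb⟩; rcases hor with h1 | h1; exact hi h1; exact hm' ⟨h1, hb⟩)]

theorem pvPos (n : Nat) (m : Int → List Int) (ps : List Int) :
    ∀ (dm : List (List Int)), pvShape n dm →
    pvShape n (ps.foldl (fun dm pos => (List.range n).foldl (fun dm i => (List.range' (i+1) (n - (i+1))).foldl (fun dm j => dm.modify j (fun row => row.modify i (fun v => v + (if (m pos).getD i 0 ≠ (m pos).getD j 0 then 1 else 0)))) dm) dm) dm) ∧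
    ∀ j' i', pvEnt (ps.foldl (fun dm pos => (List.range n).foldl (fun dm i => (List.range' (i+1) (n - (i+1))).foldl (fun dm j => dm.modify j (fun row => row.modify i (fun v => v + (if (m pos).getD i 0 ≠ (m pos).getD j 0 then 1 else 0)))) dm) dm) dm) j' i' =
      pvEnt dm j' i' + if i' < j' ∧ j' < n then (ps.map (fun pos => if (m pos).getD i' 0 ≠ (m pos).getD j' 0 then (1:Int) else 0)).sum else 0 := by
  induction ps with
  | nil => intro dm h; refine ⟨h, ?_⟩; intro j' i'; simp
  | cons pos ps' ih =>
    intro dm h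
    obtain ⟨S1, E1⟩ := pvOuter n (fun i j => if (m pos).getD i 0 ≠ (m pos).getD j 0 then (1:Int) else 0)
      (List.range n) (List.nodup_range) (fun i hi => List.mem_range.mp hi) dm h
    obtain ⟨S, E⟩ := ih _ S1
    refine ⟨by simpa using S, ?_⟩
    intro j' i'
    simp only [List.foldl_cons]
    rw [E j' i', E1 j' i']
    by_cases hc : i' < j' ∧ j' < n
    · have hic : i' ∈ List.range n := List.mem_range.mpr (by omega)
      rw [if_pos ⟨hic, hc.1, hc.2⟩, if_pos hc, if_pos hc, List.map_cons, List.sum_cons]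
      ring
    · rw [if_neg (by rintro ⟨_, h1, h2⟩; exact hc ⟨h1, h2⟩), if_neg hc, if_neg hc]
      simp

theorem pvEq_of_ent (n : Nat) (dm dm' : List (List Int)) (h : pvShape n dm) (h' : pvShape n dm')
    (he : ∀ j i, pvEnt dm j i = pvEnt dm' j i) : dm = dm' := by
  obtain ⟨hl, hr⟩ := h
  obtain ⟨hl', hr'⟩ := h'
  apply List.ext_getElem (by omega)
  intro j hj hj'
  have hrj : dm[j].length = n := hr _ (List.getElem_mem hj)
  have hrj' : dm'[j].length = n := hr' _ (List.getElem_mem hj')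
  apply List.ext_getElem (by omega)
  intro i hi hi'
  have := he j i
  unfold pvEnt at this
  simp only [List.getD_eq_getElem?_getD] at this
  rw [List.getElem?_eq_getElem hj, List.getElem?_eq_getElem hj'] at this
  simp only [Option.getD_some] at this
  rw [List.getElem?_eq_getElem hi, List.getElem?_eq_getElem hi'] at this
  simpa using this

theorem pvGetD_map_range {α : Type} (f : Nat → α) (n k : Nat) (d : α) :
    ((List.range n).map f).getD k d = if k < n then f k else d := by
  rw [List.getD_eq_getElem?_getD, List.getElem?_map]
  by_cases hk : k < n <;> simp [hk]

theorem pvCountDiff_eq_sum0 (rows : List (List Int)) (gi gj : List Int → Int) :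
    ((((rows.map gi).zip (rows.map gj)).countP (fun p => p.1 ≠ p.2) : Nat) : Int) =
      (rows.map (fun r => if gi r ≠ gj r then (1:Int) else 0)).sum := by
  rw [List.zip_map']
  induction rows with
  | nil => simp
  | cons r t ihr =>
    simp only [List.map_cons, List.countP_cons, List.sum_cons]
    by_cases hp : gi r ≠ gj r
    · simp only [if_pos hp]
      push_cast
      rw [← ihr]
      simp [hp]
      ring
    · simp only [if_neg hp]
      rw [← ihr]
      simp [hp]

theorem pvGet?_mk_nodup (d : List (Int × List (List Int))) (hnd : (d.map Prod.fst).Nodup) :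
    ∀ p ∈ d, (PySem.Dict.mk d).get? p.1 = some p.2 := by
  induction d with
  | nil => intro p hp; simp at hp
  | cons q rest ih =>
    intro p hp
    obtain ⟨k, v⟩ := q
    rw [PySem.Dict.get?_mk_cons]
    rcases List.mem_cons.mp hp with rfl | hp'
    · simp
    · have hk : k ≠ p.1 := by
        intro he
        have : p.1 ∈ rest.map Prod.fst := List.mem_map.mpr ⟨p, hp', rfl⟩
        simp only [List.map_cons, List.nodup_cons] at hnd
        exact hnd.1 (he ▸ this)
      rw [if_neg (by simpa using hk)]
      exact ih (by simp only [List.map_cons, List.nodup_cons] at hnd; exact hnd.2) p hp'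

theorem pvEnt_init (n j i : Nat) : pvEnt (List.replicate n (List.replicate n (0:Int))) j i = 0 := by
  unfold pvEnt
  simp only [List.getD_eq_getElem?_getD, List.getElem?_replicate]
  by_cases hj : j < n <;> by_cases hi : i < n <;> simp [hj, hi]

theorem pvShape_init (n : Nat) : pvShape n (List.replicate n (List.replicate n (0:Int))) := by
  refine ⟨by simp, ?_⟩
  intro r hr
  rw [List.eq_of_mem_replicate hr]
  simp

def pvMA (chrmDict : List (Int × List (List Int))) (pos : Int) : List Int :=
  (((PySem.Dict.mk chrmDict).get? pos).getD []).headI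

theorem pvB_ent (c : List (Int × List (List Int))) (nl : Int) (j i : Nat) :
    pvEnt (computeDifferencesChrm_alt c nl) j i =
      if i < j ∧ j < nl.toNat then
        pvCountDiff ((c.map (fun p => p.2.headI)).map (fun r => r.getD i 0))
                    ((c.map (fun p => p.2.headI)).map (fun r => r.getD j 0)) else 0 := by
  unfold computeDifferencesChrm_alt pvEnt
  simp only
  rw [pvGetD_map_range]
  by_cases hj : j < nl.toNat
  · rw [if_pos hj, pvGetD_map_range]
    by_cases hi : i < nl.toNat
    · rw [if_pos hi]
      by_cases hij : i < j
      · rw [if_pos hij, pvGetD_map_range, pvGetD_map_range, if_pos hi, if_pos hj,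
          if_pos ⟨hij, hj⟩]
      · rw [if_neg hij, if_neg (fun hh => hij hh.1)]
    · rw [if_neg hi, if_neg (by rintro ⟨h1, h2⟩; exact hi (by omega))]
  · rw [if_neg hj, if_neg (fun hh => hj hh.2)]
    simp

theorem pvB_shape (c : List (Int × List (List Int))) (nl : Int) :
    pvShape nl.toNat (computeDifferencesChrm_alt c nl) := by
  unfold computeDifferencesChrm_alt
  refine ⟨by simp, ?_⟩
  intro r hr
  simp only [List.mem_map] at hr
  obtain ⟨jj, _, rfl⟩ := hr
  simp

theorem pvSum_eq (c : List (Int × List (List Int))) (hnd : (c.map Prod.fst).Nodup) (i j : Nat) :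
    ((PySem.List.sorted (c.map Prod.fst) (fun k => k) false).map
        (fun pos => if (pvMA c pos).getD i 0 ≠ (pvMA c pos).getD j 0 then (1:Int) else 0)).sum =
      pvCountDiff ((c.map (fun p => p.2.headI)).map (fun r => r.getD i 0))
                  ((c.map (fun p => p.2.headI)).map (fun r => r.getD j 0)) := by
  have hperm := (PySem.List.sorted_perm (xs := c.map Prod.fst) (key := fun k => k) (rev := false)).map
    (fun pos => if (pvMA c pos).getD i 0 ≠ (pvMA c pos).getD j 0 then (1:Int) else 0)
  rw [List.Perm.sum_eq hperm]
  rw [show pvCountDiff ((c.map (fun p => p.2.headI)).map (fun r => r.getD i 0))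
        ((c.map (fun p => p.2.headI)).map (fun r => r.getD j 0)) =
      ((c.map (fun p => p.2.headI)).map
        (fun r => if r.getD i 0 ≠ r.getD j 0 then (1:Int) else 0)).sum from
    pvCountDiff_eq_sum0 _ _ _]
  rw [List.map_map, List.map_map]
  apply congrArg
  apply List.map_congr_left
  intro p hp
  have := pvGet?_mk_nodup c hnd p hp
  simp [Function.comp, pvMA, this]

theorem pvMain (chrmDict : List (Int × List (List Int))) (numLines : Int)
    (hnd : (chrmDict.map Prod.fst).Nodup) :
    computeDifferencesChrm chrmDict numLines = computeDifferencesChrm_alt chrmDict numLines := by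
  have hA : computeDifferencesChrm chrmDict numLines =
      (PySem.List.sorted (chrmDict.map Prod.fst) (fun k => k) false).foldl
        (fun dm pos => (List.range numLines.toNat).foldl
          (fun dm i => (List.range' (i+1) (numLines.toNat - (i+1))).foldl
            (fun dm j => dm.modify j (fun row => row.modify i
              (fun v => v + (if (pvMA chrmDict pos).getD i 0 ≠ (pvMA chrmDict pos).getD j 0 then 1 else 0)))) dm) dm)
        (List.replicate numLines.toNat (List.replicate numLines.toNat 0)) := rfl
  obtain ⟨SA, EA⟩ := pvPos numLines.toNat (pvMA chrmDict)
    (PySem.List.sorted (chrmDict.map Prod.fst) (fun k => k) false)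
    (List.replicate numLines.toNat (List.replicate numLines.toNat 0)) (pvShape_init _)
  rw [hA]
  apply pvEq_of_ent numLines.toNat _ _ SA (pvB_shape chrmDict numLines)
  intro j i
  rw [EA j i, pvEnt_init, pvB_ent]
  by_cases hc : i < j ∧ j < numLines.toNat
  · rw [if_pos hc, if_pos hc, pvSum_eq chrmDict hnd i j]
    ring
  · rw [if_neg hc, if_neg hc]
    ring

-- ===== VERDICT (by name: the statement is the Claim_ definition above) =====
theorem computeDifferencesChrm_spec : Claim_equal_computeDifferencesChrm := by
  intro chrmDict numLines _hdom hPre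
  exact pvMain chrmDict numLines hPre.1
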